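-- pv_equiv track=rewrite | github.com/gabibrj1/Licenta | voting/csv_download/views.py | distribute_age_group
-- ===== SOURCE A (Python) =====
-- def distribute_age_group(total_count, start_age, end_age):
--     """Distribuie uniform o grupă de vârstă pe vârste individuale"""
--     if total_count == 0:
--         return {}
--
--     distribution = {}
--     age_range = end_age - start_age + 1
--     base_count = total_count // age_range
--     remainder = total_count % age_range
--
--     for age in range(start_age, end_age + 1):
--         distribution[age] = base_count
--         if remainder > 0:
--             distribution[age] += 1
--             remainder -= 1
--
--     return distribution
-- ===== SOURCE B (Python) =====
-- def distribute_age_group(total_count, start_age, end_age):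
--     """Distribuie uniform o grupă de vârstă pe vârste individuale"""
--     if total_count == 0:
--         return {}
--     distribution = {}
--     remaining, age = total_count, start_age
--     while age <= end_age:
--         # current age takes the ceiling of an even split of what is left
--         share = -(-remaining // (end_age - age + 1))
--         distribution[age] = share
--         remaining -= share
--         age += 1
--     return distribution
-- ===== Notes on version B (the rewrite author's own statement) =====
-- stated objective: alternative
-- what changed: Replaces A's precomputed quotient/remainder with a decrementing remainder counter by a greedy self-correcting scheme: each age takes the ceiling of an even split of the amount still remaining, which is subtracted as the loop advances (no base_count, no modulo remainder, no counter).
import Mathlib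
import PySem

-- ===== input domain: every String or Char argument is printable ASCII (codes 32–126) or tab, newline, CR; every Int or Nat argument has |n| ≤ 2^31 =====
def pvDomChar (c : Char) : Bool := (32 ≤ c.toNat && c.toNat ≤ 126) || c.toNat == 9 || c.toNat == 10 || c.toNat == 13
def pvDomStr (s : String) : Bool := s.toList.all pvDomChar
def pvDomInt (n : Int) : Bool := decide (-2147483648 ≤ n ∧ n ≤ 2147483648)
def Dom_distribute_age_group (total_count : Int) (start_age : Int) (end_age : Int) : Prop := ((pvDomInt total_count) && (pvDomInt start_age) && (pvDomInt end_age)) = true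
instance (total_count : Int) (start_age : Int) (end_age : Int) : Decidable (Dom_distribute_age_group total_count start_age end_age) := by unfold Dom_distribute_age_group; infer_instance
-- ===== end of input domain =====

-- B replaces A's precomputed quotient/remainder counter with a greedy loop in which
-- each age takes the ceiling of an even split of the amount still remaining (alternative algorithm, same O(n)).


-- ===== PORT A =====
def distribute_age_group (total_count : Int) (start_age : Int) (end_age : Int) : List (Int × Int) :=
  if total_count == 0 then [] else
    let age_range := end_age - start_age + 1
    let base_count := PySem.Int.floordiv total_count age_range
    let remainder := PySem.Int.mod total_count age_range
    let final := (PySem.List.pyRange start_age (end_age + 1) 1).foldl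
      (fun (st : PySem.Dict Int Int × Int) age =>
        let d := st.1.insert age base_count
        if st.2 > 0 then (d.insert age (d.getD age 0 + 1), st.2 - 1) else (d, st.2))
      (PySem.Dict.empty, remainder)
    final.1.items

-- ===== PORT B =====
-- the 'while age <= end_age' loop of Source B, state = (distribution, remaining, age)
def pvSpreadLoop (d : PySem.Dict Int Int) (remaining : Int) (age : Int) (end_age : Int) : PySem.Dict Int Int :=
  if h : age ≤ end_age then
    let share := -(PySem.Int.floordiv (-remaining) (end_age - age + 1))
    pvSpreadLoop (d.insert age share) (remaining - share) (age + 1) end_age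
  else d
termination_by (end_age + 1 - age).toNat
decreasing_by omega

def distribute_age_group_alt (total_count : Int) (start_age : Int) (end_age : Int) : List (Int × Int) :=
  if total_count == 0 then [] else
    (pvSpreadLoop PySem.Dict.empty total_count start_age end_age).items

-- ===== PRECONDITION & SPEC =====
-- Pre_ excludes exactly the inputs where Python A raises ZeroDivisionError:
-- total_count ≠ 0 with end_age - start_age + 1 = 0.
def Pre_distribute_age_group (total_count : Int) (start_age : Int) (end_age : Int) : Prop :=
  total_count = 0 ∨ end_age - start_age + 1 ≠ 0
instance (total_count : Int) (start_age : Int) (end_age : Int) : Decidable (Pre_distribute_age_group total_count start_age end_age) := by unfold Pre_distribute_age_group; infer_instance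
def pvWitness_distribute_age_group : Int × Int × Int := (7, 3, 5)

def Spec_distribute_age_group (total_count : Int) (start_age : Int) (end_age : Int) (out : List (Int × Int)) : Prop := out = distribute_age_group_alt total_count start_age end_age
instance (total_count : Int) (start_age : Int) (end_age : Int) (out : List (Int × Int)) : Decidable (Spec_distribute_age_group total_count start_age end_age out) := by unfold Spec_distribute_age_group; infer_instance

-- ===== CLAIM (what is proved, stated in full; the proofs are below) =====
def Claim_equal_distribute_age_group : Prop := ∀ (total_count : Int) (start_age : Int) (end_age : Int), Dom_distribute_age_group total_count start_age end_age → Pre_distribute_age_group total_count start_age end_age → Spec_distribute_age_group total_count start_age end_age (distribute_age_group total_count start_age end_age)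

-- ===== LEMMAS AND PROOFS =====

-- ceiling division of t by m > 0 is floor division plus one exactly when the remainder is positive
lemma ceil_share (t m : Int) (hm : 0 < m) :
    -(PySem.Int.floordiv (-t) m) = PySem.Int.floordiv t m + (if 0 < PySem.Int.mod t m then 1 else 0) := by
  have heq := PySem.Int.floordiv_mul_add_mod t m
  have h0 := PySem.Int.mod_nonneg t hm
  have h1 := PySem.Int.mod_lt t hm
  rw [PySem.Int.neg_floordiv_neg_eq_iff_of_pos hm]
  split_ifs with hr <;> constructor <;> nlinarith

-- after the first age takes its ceiling share, the quotient of the rest over the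
-- remaining n ages is unchanged and the positive remainder shrinks by one
lemma shift_share (t : Int) (n : Nat) (hn : 0 < n) :
    PySem.Int.floordiv (t - (PySem.Int.floordiv t ((n : Int) + 1) + (if 0 < PySem.Int.mod t ((n : Int) + 1) then 1 else 0))) (n : Int)
      = PySem.Int.floordiv t ((n : Int) + 1) ∧
    PySem.Int.mod (t - (PySem.Int.floordiv t ((n : Int) + 1) + (if 0 < PySem.Int.mod t ((n : Int) + 1) then 1 else 0))) (n : Int)
      = PySem.Int.mod t ((n : Int) + 1) - (if 0 < PySem.Int.mod t ((n : Int) + 1) then 1 else 0) := by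
  have hm : (0 : Int) < (n : Int) + 1 := by positivity
  have hn' : (0 : Int) < (n : Int) := by exact_mod_cast hn
  have heq := PySem.Int.floordiv_mul_add_mod t ((n : Int) + 1)
  have h0 := PySem.Int.mod_nonneg t hm
  have h1 := PySem.Int.mod_lt t hm
  set q := PySem.Int.floordiv t ((n : Int) + 1) with hq
  set r := PySem.Int.mod t ((n : Int) + 1) with hr
  set t' := t - (q + (if 0 < r then 1 else 0)) with ht'
  have hdiv : PySem.Int.floordiv t' (n : Int) = q := by
    rw [PySem.Int.floordiv_eq_iff_of_pos hn']
    split_ifs at ht' <;> constructor <;> nlinarith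
  refine ⟨hdiv, ?_⟩
  have := PySem.Int.floordiv_mul_add_mod t' (n : Int)
  rw [hdiv] at this
  split_ifs at ht' ⊢ <;> nlinarith

-- B's while-loop over n consecutive ages, starting from a dict whose keys all lie
-- below the first age, appends the floor-plus-distributed-remainder pairs.
lemma spread_items (n : Nat) : ∀ (r sa ea : Int) (d : PySem.Dict Int Int),
    ea + 1 - sa = (n : Int) → (∀ k ∈ d.keys, k < sa) →
    (pvSpreadLoop d r sa ea).items
      = d.items ++ (List.range n).map
          (fun (k : Nat) => (sa + (k : Int),
            PySem.Int.floordiv r (n : Int) + if (k : Int) < PySem.Int.mod r (n : Int) then (1 : Int) else 0)) := by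
  induction n with
  | zero =>
    intro r sa ea d hlen _
    rw [pvSpreadLoop]
    rw [dif_neg (by omega)]
    simp
  | succ n ih =>
    intro r sa ea d hlen hd
    have hsa : sa ≤ ea := by push_cast at hlen; omega
    have hnc : d.contains sa = false := by
      cases hcb : d.contains sa with
      | false => rfl
      | true =>
        have : sa ∈ d.keys := (PySem.Dict.contains_iff_mem_keys d sa).mp hcb
        exact absurd (hd sa this) (lt_irrefl sa)
    have hm : ea - sa + 1 = (n : Int) + 1 := by push_cast at hlen ⊢; omega
    rw [pvSpreadLoop, dif_pos hsa]
    simp only [hm, ceil_share r ((n : Int) + 1) (by positivity)]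
    set q := PySem.Int.floordiv r ((n : Int) + 1) with hq
    set r0 := PySem.Int.mod r ((n : Int) + 1) with hr0
    set share := q + (if 0 < r0 then 1 else 0) with hshare
    rw [ih (r - share) (sa + 1) ea (d.insert sa share) (by push_cast at hlen ⊢; omega)
          (by intro k hk
              rcases (PySem.Dict.mem_keys_insert d sa k share).mp hk with h | h
              · omega
              · exact lt_trans (hd k h) (by omega)),
        PySem.Dict.items_insert_of_not_contains d share hnc,
        List.append_assoc, List.singleton_append,
        List.range_succ_eq_map, List.map_cons, List.map_map]
    congr 1
    congr 1
    · push_cast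
      rw [← hq, ← hr0, ← hshare]
      norm_num
    · rcases Nat.eq_zero_or_pos n with hn0 | hn
      · subst hn0; simp
      · obtain ⟨hdiv, hmod⟩ := shift_share r n hn
        rw [← hq, ← hr0, ← hshare] at hdiv hmod
        apply List.map_congr_left
        intro k hk
        simp only [Function.comp_apply, Prod.mk.injEq]
        rw [hdiv, hmod]
        have hb : 0 ≤ r0 := hr0 ▸ PySem.Int.mod_nonneg r (by positivity)
        have hknn : (0 : Int) ≤ (k : Int) := Int.natCast_nonneg k
        push_cast
        rw [← hq, ← hr0]
        refine ⟨by ring, ?_⟩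
        congr 1
        split_ifs <;> omega

-- A's loop over n consecutive ages, starting from a dict whose keys all lie below
-- the first age, appends exactly the base-plus-remainder pairs.
lemma loopA_items (bc : Int) (n : Nat) : ∀ (sa r : Int) (d : PySem.Dict Int Int),
    (∀ k ∈ d.keys, k < sa) →
    ((PySem.List.pyRange sa (sa + (n : Int)) 1).foldl
      (fun (st : PySem.Dict Int Int × Int) age =>
        let d := st.1.insert age bc
        if st.2 > 0 then (d.insert age (d.getD age 0 + 1), st.2 - 1) else (d, st.2))
      (d, r)).1.items
    = d.items ++ (List.range n).map (fun (k : Nat) => (sa + (k : Int), bc + if (k : Int) < r then (1 : Int) else 0)) := by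
  induction n with
  | zero =>
    intro sa r d _
    rw [show sa + ((0 : Nat) : Int) = sa by simp, PySem.List.pyRange_one_eq_nil le_rfl]
    simp
  | succ n ih =>
    intro sa r d hd
    have hnc : d.contains sa = false := by
      cases hcb : d.contains sa with
      | false => rfl
      | true =>
        have : sa ∈ d.keys := (PySem.Dict.contains_iff_mem_keys d sa).mp hcb
        exact absurd (hd sa this) (lt_irrefl sa)
    have hkeys : ∀ v : Int, ∀ k ∈ (d.insert sa v).keys, k < sa + 1 := by
      intro v k hk
      rcases (PySem.Dict.mem_keys_insert d sa k v).mp hk with h | h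
      · omega
      · exact lt_trans (hd k h) (by omega)
    rw [PySem.List.pyRange_one_cons (by push_cast; omega : sa < sa + ((n + 1 : Nat) : Int)),
        show sa + ((n + 1 : Nat) : Int) = (sa + 1) + (n : Int) by push_cast; ring,
        List.range_succ_eq_map, List.map_cons, List.map_map]
    simp only [List.foldl_cons, PySem.Dict.getD_insert_self, PySem.Dict.insert_insert_self] at ih ⊢
    by_cases hr : r > 0
    · rw [if_pos hr, ih (sa + 1) (r - 1) (d.insert sa (bc + 1)) (hkeys _),
          PySem.Dict.items_insert_of_not_contains d (bc + 1) hnc,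
          List.append_assoc, List.singleton_append]
      congr 1
      congr 1
      · simp [show (0 : Int) < r from hr]
      · apply List.map_congr_left
        intro k _
        simp only [Function.comp_apply, Prod.mk.injEq]
        refine ⟨by push_cast; ring, ?_⟩
        have hk : (0 : Int) ≤ (k : Int) := Int.natCast_nonneg k
        push_cast
        split_ifs <;> first | rfl | omega
    · rw [if_neg hr, ih (sa + 1) r (d.insert sa bc) (hkeys _),
          PySem.Dict.items_insert_of_not_contains d bc hnc,
          List.append_assoc, List.singleton_append]
      congr 1
      congr 1
      · simp [show ¬ ((0 : Int) < r) from hr]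
      · apply List.map_congr_left
        intro k _
        simp only [Function.comp_apply, Prod.mk.injEq]
        refine ⟨by push_cast; ring, ?_⟩
        have hk : (0 : Int) ≤ (k : Int) := Int.natCast_nonneg k
        push_cast
        split_ifs <;> first | rfl | omega

-- ===== VERDICT (by name: the statement is the Claim_ definition above) =====
theorem distribute_age_group_spec : Claim_equal_distribute_age_group := by
  intro tc sa ea _ hpre
  unfold Spec_distribute_age_group distribute_age_group distribute_age_group_alt
  by_cases htc : tc == 0
  · simp [htc]
  · simp only [htc, Bool.false_eq_true, if_false]
    have htc' : tc ≠ 0 := by simpa using htc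
    have har : ea - sa + 1 ≠ 0 := by
      rcases hpre with h | h
      · exact absurd h htc'
      · exact h
    by_cases hpos : 0 < ea - sa + 1
    · set n := (ea - sa + 1).toNat with hn
      have hm : (ea - sa + 1 : Int) = (n : Int) := by omega
      have hn1 : ea + 1 = sa + (n : Int) := by omega
      rw [hn1, loopA_items _ _ sa _ PySem.Dict.empty
            (by simp [show (PySem.Dict.empty : PySem.Dict Int Int).keys = [] from rfl]),
          spread_items n tc sa ea PySem.Dict.empty (by omega)
            (by simp [show (PySem.Dict.empty : PySem.Dict Int Int).keys = [] from rfl])]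
      rw [hm]
    · have hneg : ea - sa + 1 < 0 := by omega
      rw [PySem.List.pyRange_one_eq_nil (by omega : ea + 1 ≤ sa), pvSpreadLoop,
          dif_neg (by omega : ¬ sa ≤ ea)]
      simp [show (PySem.Dict.empty : PySem.Dict Int Int).items = [] from rfl]
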